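-- pv_equiv track=rewrite | github.com/leechanhoe/study-algorithm | src/programmers/level2/택배_배달과_수거하기.py | solution
-- ===== SOURCE A (Python) =====
-- def solution(cap, n, deliveries, pickups):
--     d = []
--     p = []
--     for i in range(n):
--         if 0 < deliveries[i]:
--             d.append([i + 1, deliveries[i]])
--         if 0 < pickups[i]:
--             p.append([i + 1, pickups[i]])
--
--     ans = 0
--     while d or p:
--         left = cap
--         d_max = 0
--         if d:
--             d_max = d[-1][0]
--         ans += d_max
--         while left and d:
--             d_num = min(d[-1][1], left)
--             left -= d_num
--             d[-1][1] -= d_num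
--             if d[-1][1] <= 0:
--                 d.pop()
--
--         left = cap
--         p_max = 0
--         if p:
--             p_max = p[-1][0]
--         ans += p_max + abs(d_max - p_max)
--         while left and p:
--             p_num = min(p[-1][1], left)
--             left -= p_num
--             p[-1][1] -= p_num
--             if p[-1][1] <= 0:
--                 p.pop()
--     return ans
-- ===== SOURCE B (Python) =====
-- def solution(cap, n, deliveries, pickups):
--     # One backward pass over the stations: total distance = 2 * sum over stations k
--     # of ceil(max(suffix deliveries, suffix pickups) / cap).
--     ans = 0
--     ds = 0
--     ps = 0
--     for i in range(n - 1, -1, -1):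
--         ds += max(deliveries[i], 0)
--         ps += max(pickups[i], 0)
--         m = ds if ds > ps else ps
--         if m > 0:
--             ans += 2 * ((m + cap - 1) // cap)
--     return ans
-- ===== Notes on version B (the rewrite author's own statement) =====
-- stated objective: alternative
-- what changed: Replaces A's trip-by-trip two-stack simulation (each round hauls cap units off the delivery and pickup stacks) by a single backward pass that adds 2*ceil(max(suffix deliveries, suffix pickups)/cap) per station in closed form.
import Mathlib
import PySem

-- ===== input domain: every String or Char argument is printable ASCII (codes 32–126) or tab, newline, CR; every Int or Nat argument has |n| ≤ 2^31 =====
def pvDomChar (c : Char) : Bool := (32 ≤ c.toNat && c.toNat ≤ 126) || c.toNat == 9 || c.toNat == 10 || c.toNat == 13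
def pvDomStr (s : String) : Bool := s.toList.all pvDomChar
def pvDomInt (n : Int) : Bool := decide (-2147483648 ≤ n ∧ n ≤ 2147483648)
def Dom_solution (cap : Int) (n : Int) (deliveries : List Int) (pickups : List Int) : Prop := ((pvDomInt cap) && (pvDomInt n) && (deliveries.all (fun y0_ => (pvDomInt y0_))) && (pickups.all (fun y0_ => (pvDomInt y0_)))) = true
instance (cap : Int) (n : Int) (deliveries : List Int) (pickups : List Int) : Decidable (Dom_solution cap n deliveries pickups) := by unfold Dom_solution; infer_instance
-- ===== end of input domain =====

-- B replaces A's trip-by-trip two-stack simulation by one backward pass summing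
-- 2*ceil(max(suffix deliveries, suffix pickups)/cap) per station (alternative algorithm, same result).


-- ===== PORT A =====
-- Python keeps each stack in a list with the top at the END (append / d[-1] / pop);
-- here the same stack is kept with the top at the HEAD (cons / head / tail) — the same
-- stack contents in reverse storage order, every operation exact.
-- 'for i in range(n): if 0 < deliveries[i]: d.append(...) ...':
def solnBuild (deliveries : List Int) (pickups : List Int) (n : Int) :
    List (Int × Int) × List (Int × Int) :=
  (PySem.List.pyRange 0 n 1).foldl
    (fun st i =>
      let st1 := if 0 < PySem.List.pyGetD deliveries i 0 then
                   (i + 1, PySem.List.pyGetD deliveries i 0) :: st.1 else st.1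
      let st2 := if 0 < PySem.List.pyGetD pickups i 0 then
                   (i + 1, PySem.List.pyGetD pickups i 0) :: st.2 else st.2
      (st1, st2))
    ([], [])

-- 'while left and d: ...' (the inner unloading loop, identical for d and p).
-- Ported with fuel; length+1 iterations always suffice (each pass either pops the
-- top entry or zeroes 'left', which ends the loop).
def solnInner : Nat → Int → List (Int × Int) → List (Int × Int)
  | 0, _, st => st
  | _ + 1, _, [] => []                       -- guard 'left and d' fails: d empty
  | fuel + 1, left, (pos, q) :: rest =>
    if left = 0 then (pos, q) :: rest        -- guard 'left and d' fails: left == 0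
    else
      let num := min q left
      if q - num ≤ 0 then solnInner fuel (left - num) rest
      else solnInner fuel (left - num) ((pos, q - num) :: rest)

-- 'while d or p: ...' (one iteration = one round trip), ported with fuel; under
-- Pre_solution total-units + 1 iterations suffice (each trip unloads ≥ 1 unit).
def solnOuter (cap : Int) : Nat → List (Int × Int) → List (Int × Int) → Int → Int
  | 0, _, _, ans => ans
  | fuel + 1, d, p, ans =>
    if d = [] ∧ p = [] then ans
    else
      let dmax : Int := match d with | [] => 0 | (pos, _) :: _ => pos
      let d' := solnInner (d.length + 1) cap d
      let pmax : Int := match p with | [] => 0 | (pos, _) :: _ => pos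
      let p' := solnInner (p.length + 1) cap p
      solnOuter cap fuel d' p' (ans + dmax + pmax + |dmax - pmax|)

def solution (cap : Int) (n : Int) (deliveries : List Int) (pickups : List Int) : Int :=
  let st := solnBuild deliveries pickups n
  solnOuter cap (((st.1.map Prod.snd).sum + (st.2.map Prod.snd).sum).toNat + 1) st.1 st.2 0

-- ===== PORT B =====
-- one step of Source B's backward loop body
def altStep (cap : Int) (deliveries : List Int) (pickups : List Int)
    (st : Int × Int × Int) (i : Int) : Int × Int × Int :=
  let ds := st.2.1 + max (PySem.List.pyGetD deliveries i 0) 0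
  let ps := st.2.2 + max (PySem.List.pyGetD pickups i 0) 0
  let m := if ps < ds then ds else ps
  ((if 0 < m then st.1 + 2 * PySem.Int.floordiv (m + cap - 1) cap else st.1), ds, ps)

def solution_alt (cap : Int) (n : Int) (deliveries : List Int) (pickups : List Int) : Int :=
  ((PySem.List.pyRange (n - 1) (-1) (-1)).foldl (altStep cap deliveries pickups) (0, 0, 0)).1

-- ===== PRECONDITION & SPEC =====
-- Pre_ excludes exactly the inputs where A does not return: n > len(deliveries) or
-- n > len(pickups) (IndexError), and cap ≤ 0 with some positive delivery/pickup among
-- the first n stations (A's while loop then never drains the stacks and diverges).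
def Pre_solution (cap : Int) (n : Int) (deliveries : List Int) (pickups : List Int) : Prop :=
  n ≤ deliveries.length ∧ n ≤ pickups.length ∧
  (1 ≤ cap ∨ ((∀ x ∈ deliveries.take n.toNat, x ≤ 0) ∧ (∀ x ∈ pickups.take n.toNat, x ≤ 0)))
instance (cap : Int) (n : Int) (deliveries : List Int) (pickups : List Int) : Decidable (Pre_solution cap n deliveries pickups) := by unfold Pre_solution; infer_instance

def pvWitness_solution : Int × Int × List Int × List Int := (4, 5, [1, 0, 3, 1, 2], [0, 3, 0, 4, 0])

def Spec_solution (cap : Int) (n : Int) (deliveries : List Int) (pickups : List Int) (out : Int) : Prop := out = solution_alt cap n deliveries pickups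
instance (cap : Int) (n : Int) (deliveries : List Int) (pickups : List Int) (out : Int) : Decidable (Spec_solution cap n deliveries pickups out) := by unfold Spec_solution; infer_instance

-- ===== CLAIM (what is proved, stated in full; the proofs are below) =====
def Claim_equal_solution : Prop := ∀ (cap : Int) (n : Int) (deliveries : List Int) (pickups : List Int), Dom_solution cap n deliveries pickups → Pre_solution cap n deliveries pickups → Spec_solution cap n deliveries pickups (solution cap n deliveries pickups)

-- ===== LEMMAS AND PROOFS =====

-- ceil-division term contributed by one station (0 for an empty suffix)
def cdiv (cap m : Int) : Int := if 0 < m then PySem.Int.floordiv (m + cap - 1) cap else 0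

-- positive part of station i's load
def dF (xs : List Int) (i : Nat) : Int := max (xs.getD i 0) 0

-- suffix sum of positive loads over stations k..L-1
def sfx (xs : List Int) (L k : Nat) : Int := ∑ i ∈ Finset.Ico k L, dF xs i

-- units still on a stack at stations with position > k
def S (st : List (Int × Int)) (k : Nat) : Int :=
  ((st.filter (fun e => (k : Int) < e.1)).map Prod.snd).sum

-- well-formed stack: positions strictly decreasing from the head, in 1..L, loads positive
def GoodSt (L : Nat) (st : List (Int × Int)) : Prop :=
  st.Pairwise (fun a b => b.1 < a.1) ∧ ∀ e ∈ st, 0 < e.2 ∧ 0 < e.1 ∧ e.1 ≤ (L : Int)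

-- mathematical content of the inner loop: remove c units from the top down
def dropUnits (c : Int) : List (Int × Int) → List (Int × Int)
  | [] => []
  | (pos, q) :: rest => if q ≤ c then dropUnits (c - q) rest else (pos, q - c) :: rest

theorem S_nil (k : Nat) : S [] k = 0 := rfl

theorem S_cons (pos q : Int) (rest : List (Int × Int)) (k : Nat) :
    S ((pos, q) :: rest) k = (if (k : Int) < pos then q else 0) + S rest k := by
  simp only [S, List.filter_cons]
  split <;> simp_all

theorem S_eq_zero (st : List (Int × Int)) (k : Nat) (h : ∀ e ∈ st, e.1 ≤ (k : Int)) :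
    S st k = 0 := by
  have : st.filter (fun e => (k : Int) < e.1) = [] := by
    rw [List.filter_eq_nil_iff]
    intro e he
    simpa using not_lt.2 (h e he)
  simp [S, this]

theorem S_nonneg (st : List (Int × Int)) (k : Nat) (h : ∀ e ∈ st, 0 < e.2) :
    0 ≤ S st k := by
  induction st with
  | nil => simp [S_nil]
  | cons e rest ih =>
    obtain ⟨pos, q⟩ := e
    rw [S_cons]
    have hq : 0 < q := h _ List.mem_cons_self
    have := ih (fun e he => h e (List.mem_cons_of_mem _ he))
    split <;> omega

def headPos : List (Int × Int) → Int
  | [] => 0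
  | (pos, _) :: _ => pos

theorem S_pos_iff (L : Nat) (st : List (Int × Int)) (hst : GoodSt L st) (k : Nat) :
    0 < S st k ↔ (k : Int) < headPos st := by
  obtain ⟨hpair, hmem⟩ := hst
  cases st with
  | nil =>
    simp only [S_nil, headPos]
    omega
  | cons e rest =>
    obtain ⟨pos, q⟩ := e
    rw [S_cons]
    simp only [headPos]
    have hq : 0 < q := (hmem _ List.mem_cons_self).1
    by_cases hk : (k : Int) < pos
    · have hr : 0 ≤ S rest k :=
        S_nonneg _ _ (fun e he => (hmem e (List.mem_cons_of_mem _ he)).1)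
      rw [if_pos hk]
      omega
    · have hr : S rest k = 0 := by
        apply S_eq_zero
        intro e he
        have := (List.pairwise_cons.1 hpair).1 e he
        omega
      rw [if_neg hk, hr]
      omega

theorem solnInner_zero (fuel : Nat) (st : List (Int × Int)) : solnInner fuel 0 st = st := by
  cases fuel with
  | zero => rfl
  | succ fuel =>
    cases st with
    | nil => rfl
    | cons e rest => obtain ⟨pos, q⟩ := e; simp [solnInner]

-- the inner while loop IS dropUnits (fuel length+1 suffices)
theorem solnInner_eq_dropUnits (st : List (Int × Int)) :
    ∀ c : Int, 0 ≤ c → (∀ e ∈ st, 0 < e.2) → solnInner (st.length + 1) c st = dropUnits c st := by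
  induction st with
  | nil =>
    intro c _ _
    rfl
  | cons e rest ih =>
    intro c hc hmem
    obtain ⟨pos, q⟩ := e
    have hq : 0 < q := hmem _ List.mem_cons_self
    by_cases h0 : c = 0
    · subst h0
      rw [solnInner_zero, dropUnits, if_neg (by omega : ¬ q ≤ (0:Int))]
      norm_num
    · rw [List.length_cons, solnInner, if_neg h0, dropUnits]
      by_cases hqc : q ≤ c
      · have hnum : min q c = q := by omega
        rw [if_pos hqc]
        simp only [hnum, (by omega : q - q ≤ (0:Int)), if_true]
        exact ih (c - q) (by omega) (fun e he => hmem e (List.mem_cons_of_mem _ he))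
      · have hnum : min q c = c := by omega
        simp only [hnum]
        rw [if_neg hqc, if_neg (by omega : ¬ (q - c ≤ (0:Int))), (by omega : c - c = (0:Int))]
        exact solnInner_zero _ _

theorem dropUnits_good (L : Nat) (st : List (Int × Int)) :
    ∀ c : Int, GoodSt L st → GoodSt L (dropUnits c st) := by
  induction st with
  | nil => intro c h; simpa [dropUnits] using h
  | cons e rest ih =>
    intro c hg
    obtain ⟨hpair, hmem⟩ := hg
    obtain ⟨pos, q⟩ := e
    rw [dropUnits]
    split
    · exact ih (c - q)
        ⟨(List.pairwise_cons.1 hpair).2, fun e he => hmem e (List.mem_cons_of_mem _ he)⟩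
    · refine ⟨?_, ?_⟩
      · rw [List.pairwise_cons]
        exact ⟨(List.pairwise_cons.1 hpair).1, (List.pairwise_cons.1 hpair).2⟩
      · intro e he
        rcases List.mem_cons.1 he with rfl | he
        · have h1 := hmem _ List.mem_cons_self
          have h2 : ¬ q ≤ c := by assumption
          refine ⟨by omega, h1.2.1, h1.2.2⟩
        · exact hmem e (List.mem_cons_of_mem _ he)

theorem S_dropUnits (L : Nat) (st : List (Int × Int)) :
    ∀ c : Int, 0 ≤ c → GoodSt L st → ∀ k, S (dropUnits c st) k = max (S st k - c) 0 := by
  induction st with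
  | nil => intro c hc _ k; simp only [dropUnits, S_nil]; omega
  | cons e rest ih =>
    intro c hc hg k
    obtain ⟨hpair, hmem⟩ := hg
    obtain ⟨pos, q⟩ := e
    have hq : 0 < q := (hmem _ List.mem_cons_self).1
    have hrest0 : pos ≤ (k:Int) → S rest k = 0 := by
      intro hp
      apply S_eq_zero
      intro e he
      have := (List.pairwise_cons.1 hpair).1 e he
      omega
    have hrnn : 0 ≤ S rest k :=
      S_nonneg _ _ (fun e he => (hmem e (List.mem_cons_of_mem _ he)).1)
    rw [dropUnits]
    split
    · rename_i hqc
      rw [ih (c - q) (by omega)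
        ⟨(List.pairwise_cons.1 hpair).2, fun e he => hmem e (List.mem_cons_of_mem _ he)⟩ k]
      rw [S_cons]
      by_cases hk : (k : Int) < pos
      · simp only [hk, if_true]; omega
      · have := hrest0 (by omega)
        simp only [hk, if_false, this]
        omega
    · rename_i hqc
      rw [S_cons, S_cons]
      by_cases hk : (k : Int) < pos
      · simp only [hk, if_true]; omega
      · have := hrest0 (by omega)
        simp only [hk, if_false, this]
        omega

theorem total_eq_S_zero (L : Nat) (st : List (Int × Int)) (h : GoodSt L st) :
    (st.map Prod.snd).sum = S st 0 := by
  have heq : st.filter (fun e => (0 : Int) < e.1) = st := by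
    rw [List.filter_eq_self]
    intro e he
    simpa using (h.2 e he).2.1
  simp [S, heq]

theorem stack_nil_of_S_zero (L : Nat) (st : List (Int × Int)) (hg : GoodSt L st)
    (h : S st 0 = 0) : st = [] := by
  cases st with
  | nil => rfl
  | cons e rest =>
    exfalso
    obtain ⟨pos, q⟩ := e
    have hp : (0:Int) < headPos ((pos, q) :: rest) := by
      simpa [headPos] using (hg.2 _ List.mem_cons_self).2.1
    have := (S_pos_iff L _ hg 0).2 (by simpa using hp)
    omega

-- counting lemma: ∑_{k<L} [k < t] = min t L
theorem sum_indicator (t L : Nat) :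
    ∑ k ∈ Finset.range L, (if k < t then (1 : Int) else 0) = ((min t L : Nat) : Int) := by
  induction L with
  | zero => simp
  | succ L ih =>
    rw [Finset.sum_range_succ, ih]
    by_cases h : L < t
    · rw [if_pos h]
      have hm : min t (L + 1) = min t L + 1 := by omega
      rw [hm]
      push_cast
      ring
    · rw [if_neg h]
      have hm : min t (L + 1) = min t L := by omega
      rw [hm]
      ring

-- one trip's worth of ceil-division arithmetic
theorem cdiv_step (cap x : Int) (hc : 1 ≤ cap) (hx : 0 ≤ x) :
    cdiv cap x = (if 0 < x then (1 : Int) else 0) + cdiv cap (max (x - cap) 0) := by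
  unfold cdiv
  by_cases h0 : 0 < x
  · simp only [h0, if_true]
    by_cases hbig : cap < x
    · have hmax : max (x - cap) 0 = x - cap := by omega
      rw [hmax]
      simp only [(show (0:Int) < x - cap by omega), if_true]
      rw [PySem.Int.floordiv_eq_ediv_of_pos (by omega), PySem.Int.floordiv_eq_ediv_of_pos (by omega)]
      have h1 : x + cap - 1 = (x - cap + cap - 1) + 1 * cap := by ring
      rw [h1, Int.add_mul_ediv_right _ _ (show cap ≠ 0 by omega)]
      ring
    · have hmax : max (x - cap) 0 = 0 := by omega
      rw [hmax]
      simp only [lt_irrefl, if_false]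
      have h2 : PySem.Int.floordiv (x + cap - 1) cap = 1 := by
        rw [PySem.Int.floordiv_eq_iff_of_pos (by omega)]
        constructor
        · nlinarith
        · nlinarith
      omega
  · simp only [h0, if_false]
    have hmax : max (x - cap) 0 = 0 := by omega
    simp [hmax]

theorem sum_cdiv_trip (cap : Int) (hc : 1 ≤ cap) (L : Nat) (M : Nat → Int)
    (hM : ∀ k, 0 ≤ M k) (m : Int) (hm0 : 0 ≤ m) (hmL : m ≤ (L : Int))
    (hiff : ∀ k < L, (0 < M k ↔ (k : Int) < m)) :
    ∑ k ∈ Finset.range L, cdiv cap (M k)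
      = m + ∑ k ∈ Finset.range L, cdiv cap (max (M k - cap) 0) := by
  have hpt : ∀ k ∈ Finset.range L,
      cdiv cap (M k) = (if k < m.toNat then (1 : Int) else 0) + cdiv cap (max (M k - cap) 0) := by
    intro k hk
    rw [cdiv_step cap (M k) hc (hM k)]
    congr 1
    have h1 := hiff k (Finset.mem_range.1 hk)
    by_cases h2 : k < m.toNat
    · have : 0 < M k := h1.2 (by omega)
      simp [h2, this]
    · have : ¬ 0 < M k := fun hpos => h2 (by have := h1.1 hpos; omega)
      simp [h2, this]
  rw [Finset.sum_congr rfl hpt, Finset.sum_add_distrib, sum_indicator]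
  have hmin : min m.toNat L = m.toNat := by omega
  rw [hmin]
  omega

theorem solnOuter_succ (cap : Int) (fuel : Nat) (d p : List (Int × Int)) (ans : Int) :
    solnOuter cap (fuel + 1) d p ans =
      if d = [] ∧ p = [] then ans
      else
        solnOuter cap fuel (solnInner (d.length + 1) cap d) (solnInner (p.length + 1) cap p)
          (ans + headPos d + headPos p + |headPos d - headPos p|) := rfl

-- the outer loop computes ans + 2 * Σ cdiv over stations
theorem outer_eq (cap : Int) (hc : 1 ≤ cap) (L : Nat) :
    ∀ (fuel : Nat) (d p : List (Int × Int)) (ans : Int),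
      GoodSt L d → GoodSt L p → (S d 0 + S p 0).toNat < fuel →
      solnOuter cap fuel d p ans
        = ans + 2 * ∑ k ∈ Finset.range L, cdiv cap (max (S d k) (S p k)) := by
  intro fuel
  induction fuel with
  | zero => intro d p ans _ _ hfuel; exact absurd hfuel (by omega)
  | succ fuel ih =>
    intro d p ans hd hp hfuel
    rw [solnOuter_succ]
    by_cases hemp : d = [] ∧ p = []
    · obtain ⟨rfl, rfl⟩ := hemp
      simp [S_nil, cdiv]
    · simp only [hemp, if_false]
      have hdnn : ∀ k, 0 ≤ S d k := fun k => S_nonneg _ _ (fun e he => (hd.2 e he).1)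
      have hpnn : ∀ k, 0 ≤ S p k := fun k => S_nonneg _ _ (fun e he => (hp.2 e he).1)
      have hdinner : solnInner (d.length + 1) cap d = dropUnits cap d :=
        solnInner_eq_dropUnits d cap (by omega) (fun e he => (hd.2 e he).1)
      have hpinner : solnInner (p.length + 1) cap p = dropUnits cap p :=
        solnInner_eq_dropUnits p cap (by omega) (fun e he => (hp.2 e he).1)
      have hd' : GoodSt L (dropUnits cap d) := dropUnits_good L d cap hd
      have hp' : GoodSt L (dropUnits cap p) := dropUnits_good L p cap hp
      have hSd : ∀ k, S (dropUnits cap d) k = max (S d k - cap) 0 :=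
        S_dropUnits L d cap (by omega) hd
      have hSp : ∀ k, S (dropUnits cap p) k = max (S p k - cap) 0 :=
        S_dropUnits L p cap (by omega) hp
      have hpos : 0 < S d 0 ∨ 0 < S p 0 := by
        rcases (not_and_or.1 hemp) with h | h
        · left
          rw [S_pos_iff L d hd 0]
          cases d with
          | nil => exact absurd rfl h
          | cons e rest =>
            obtain ⟨pos, q⟩ := e
            simpa [headPos] using (hd.2 _ List.mem_cons_self).2.1
        · right
          rw [S_pos_iff L p hp 0]
          cases p with
          | nil => exact absurd rfl h
          | cons e rest =>
            obtain ⟨pos, q⟩ := e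
            simpa [headPos] using (hp.2 _ List.mem_cons_self).2.1
      have hfuel' : (S (dropUnits cap d) 0 + S (dropUnits cap p) 0).toNat < fuel := by
        rw [hSd 0, hSp 0]
        have h1 := hdnn 0
        have h2 := hpnn 0
        rcases max_cases (S d 0 - cap) 0 with ⟨h3, _⟩ | ⟨h3, _⟩ <;>
          rcases max_cases (S p 0 - cap) 0 with ⟨h5, _⟩ | ⟨h5, _⟩ <;> omega
      rw [hdinner, hpinner, ih _ _ _ hd' hp' hfuel']
      have hhd0 : 0 ≤ headPos d := by
        cases d with
        | nil => rw [headPos]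
        | cons e rest =>
          obtain ⟨a, b⟩ := e
          have := (hd.2 _ List.mem_cons_self).2.1
          rw [headPos]; omega
      have hhp0 : 0 ≤ headPos p := by
        cases p with
        | nil => rw [headPos]
        | cons e rest =>
          obtain ⟨a, b⟩ := e
          have := (hp.2 _ List.mem_cons_self).2.1
          rw [headPos]; omega
      have hhdL : headPos d ≤ (L : Int) := by
        cases d with
        | nil => rw [headPos]; omega
        | cons e rest =>
          obtain ⟨a, b⟩ := e
          have := (hd.2 _ List.mem_cons_self).2.2
          rw [headPos]; omega
      have hhpL : headPos p ≤ (L : Int) := by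
        cases p with
        | nil => rw [headPos]; omega
        | cons e rest =>
          obtain ⟨a, b⟩ := e
          have := (hp.2 _ List.mem_cons_self).2.2
          rw [headPos]; omega
      have hsum := sum_cdiv_trip cap hc L (fun k => max (S d k) (S p k))
        (fun k => by show 0 ≤ max (S d k) (S p k); have := hdnn k; have := hpnn k; omega)
        (max (headPos d) (headPos p)) (by omega) (by omega)
        (by
          intro k hk
          show 0 < max (S d k) (S p k) ↔ (k : Int) < max (headPos d) (headPos p)
          have h1 := S_pos_iff L d hd k
          have h2 := S_pos_iff L p hp k
          rcases max_cases (S d k) (S p k) with ⟨he, hl⟩ | ⟨he, hl⟩ <;>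
            rcases max_cases (headPos d) (headPos p) with ⟨he2, hl2⟩ | ⟨he2, hl2⟩ <;>
              rw [he, he2] <;> constructor <;> intro hh <;> omega)
      have hmaxmax : ∀ k, max (S (dropUnits cap d) k) (S (dropUnits cap p) k)
          = max (max (S d k) (S p k) - cap) 0 := by
        intro k
        rw [hSd k, hSp k]
        rcases max_cases (S d k) (S p k) with ⟨h1, h2⟩ | ⟨h1, h2⟩ <;>
          (rcases max_cases (S d k - cap) 0 with ⟨h3, h4⟩ | ⟨h3, h4⟩ <;>
           rcases max_cases (S p k - cap) 0 with ⟨h5, h6⟩ | ⟨h5, h6⟩ <;>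
           rcases max_cases (max (S d k) (S p k) - cap) 0 with ⟨h7, h8⟩ | ⟨h7, h8⟩ <;> omega)
      have habs : headPos d + headPos p + |headPos d - headPos p|
          = 2 * max (headPos d) (headPos p) := by
        rcases le_total (headPos d) (headPos p) with h | h
        · rw [abs_of_nonpos (by omega), max_eq_right h]; ring
        · rw [abs_of_nonneg (by omega), max_eq_left h]; ring
      simp only [hmaxmax]
      have hsum' : (∑ k ∈ Finset.range L, cdiv cap (max (S d k) (S p k)))
          = max (headPos d) (headPos p)
            + ∑ k ∈ Finset.range L, cdiv cap (max (max (S d k) (S p k) - cap) 0) := by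
        simpa using hsum
      linarith [habs, hsum']

-- the build loop, re-indexed over List.range (proof-side helper)
def buildF (deliveries pickups : List Int) (j : Nat) : List (Int × Int) × List (Int × Int) :=
  (List.map (fun k : Nat => (k : Int)) (List.range j)).foldl
    (fun st i =>
      let st1 := if 0 < PySem.List.pyGetD deliveries i 0 then
                   (i + 1, PySem.List.pyGetD deliveries i 0) :: st.1 else st.1
      let st2 := if 0 < PySem.List.pyGetD pickups i 0 then
                   (i + 1, PySem.List.pyGetD pickups i 0) :: st.2 else st.2
      (st1, st2))
    ([], [])

theorem solnBuild_eq_buildF (deliveries pickups : List Int) (n : Int) :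
    solnBuild deliveries pickups n = buildF deliveries pickups n.toNat := by
  unfold solnBuild buildF
  rw [PySem.List.pyRange_zero]

-- invariant of the build loop: stacks are well-formed and S is the suffix sum
theorem buildF_invariant (deliveries pickups : List Int) (j : Nat) :
    GoodSt j (buildF deliveries pickups j).1 ∧ GoodSt j (buildF deliveries pickups j).2 ∧
    (∀ k, S (buildF deliveries pickups j).1 k = ∑ i ∈ Finset.Ico k j, dF deliveries i) ∧
    (∀ k, S (buildF deliveries pickups j).2 k = ∑ i ∈ Finset.Ico k j, dF pickups i) := by
  induction j with
  | zero =>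
    refine ⟨⟨List.Pairwise.nil, by simp [buildF]⟩, ⟨List.Pairwise.nil, by simp [buildF]⟩, ?_, ?_⟩ <;>
      (intro k; simp [buildF, S_nil])
  | succ j ih =>
    obtain ⟨⟨hdp, hdm⟩, ⟨hpp, hpm⟩, hSd, hSp⟩ := ih
    have hstep : buildF deliveries pickups (j + 1) =
        (let st := buildF deliveries pickups j
         let st1 := if 0 < PySem.List.pyGetD deliveries (j : Int) 0 then
                      ((j : Int) + 1, PySem.List.pyGetD deliveries (j : Int) 0) :: st.1 else st.1
         let st2 := if 0 < PySem.List.pyGetD pickups (j : Int) 0 then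
                      ((j : Int) + 1, PySem.List.pyGetD pickups (j : Int) 0) :: st.2 else st.2
         (st1, st2)) := by
      unfold buildF
      rw [List.range_succ, List.map_append, List.foldl_append]
      rfl
    rw [hstep]
    simp only [PySem.List.pyGetD_natCast]
    -- one generic component step
    have comp : ∀ (xs : List Int) (st : List (Int × Int)),
        GoodSt j st → (∀ k, S st k = ∑ i ∈ Finset.Ico k j, dF xs i) →
        GoodSt (j + 1) (if 0 < xs.getD j 0 then ((j : Int) + 1, xs.getD j 0) :: st else st) ∧
        (∀ k, S (if 0 < xs.getD j 0 then ((j : Int) + 1, xs.getD j 0) :: st else st) k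
            = ∑ i ∈ Finset.Ico k (j + 1), dF xs i) := by
      intro xs st ⟨hp, hm⟩ hS
      have hico : ∀ k : Nat, ∑ i ∈ Finset.Ico k (j + 1), dF xs i
          = (if (k : Int) < (j : Int) + 1 then dF xs j else 0) + ∑ i ∈ Finset.Ico k j, dF xs i := by
        intro k
        by_cases hk : k ≤ j
        · rw [Finset.sum_Ico_succ_top hk]
          have : ((k : Int) < (j : Int) + 1) := by omega
          rw [if_pos this]
          ring
        · have h1 : Finset.Ico k (j + 1) = ∅ := Finset.Ico_eq_empty (by omega)
          have h2 : Finset.Ico k j = ∅ := Finset.Ico_eq_empty (by omega)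
          have h3 : ¬ ((k : Int) < (j : Int) + 1) := by omega
          rw [h1, h2, if_neg h3]
          simp
      by_cases hpos : 0 < xs.getD j 0
      · rw [if_pos hpos]
        refine ⟨⟨?_, ?_⟩, ?_⟩
        · rw [List.pairwise_cons]
          refine ⟨fun e he => ?_, hp⟩
          have := (hm e he).2.2
          omega
        · intro e he
          rcases List.mem_cons.1 he with rfl | he
          · refine ⟨hpos, by omega, by push_cast; omega⟩
          · have := hm e he
            refine ⟨this.1, this.2.1, by push_cast; omega⟩
        · intro k
          rw [S_cons, hS k, hico k]
          have hdF : dF xs j = xs.getD j 0 := by unfold dF; omega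
          rw [hdF]
      · rw [if_neg hpos]
        refine ⟨⟨hp, ?_⟩, ?_⟩
        · intro e he
          have := hm e he
          refine ⟨this.1, this.2.1, by push_cast; omega⟩
        · intro k
          rw [hS k, hico k]
          have hdF : dF xs j = 0 := by unfold dF; omega
          rw [hdF]
          simp
    have c1 := comp deliveries (buildF deliveries pickups j).1 ⟨hdp, hdm⟩ hSd
    have c2 := comp pickups (buildF deliveries pickups j).2 ⟨hpp, hpm⟩ hSp
    exact ⟨c1.1, c2.1, c1.2, c2.2⟩

-- Source B's backward fold, re-indexed over List.range (proof-side helper)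
def altF (cap : Int) (deliveries pickups : List Int) (n : Int) (j : Nat) : Int × Int × Int :=
  (List.map (fun t : Nat => n - 1 - (t : Int)) (List.range j)).foldl (altStep cap deliveries pickups) (0, 0, 0)

theorem solution_alt_eq_altF (cap : Int) (n : Int) (deliveries pickups : List Int) :
    solution_alt cap n deliveries pickups = (altF cap deliveries pickups n n.toNat).1 := by
  unfold solution_alt altF
  rw [PySem.List.pyRange_neg_one]
  have : (n - 1 - -1).toNat = n.toNat := by omega
  rw [this]

-- invariant of Source B's backward loop
theorem altF_invariant (cap : Int) (deliveries pickups : List Int) (n : Int) :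
    ∀ j : Nat, j ≤ n.toNat →
      altF cap deliveries pickups n j =
        (2 * ∑ t ∈ Finset.range j,
          cdiv cap (max (sfx deliveries n.toNat (n.toNat - 1 - t)) (sfx pickups n.toNat (n.toNat - 1 - t))),
         sfx deliveries n.toNat (n.toNat - j), sfx pickups n.toNat (n.toNat - j)) := by
  intro j
  induction j with
  | zero =>
    intro _
    unfold altF sfx
    simp
  | succ j ih =>
    intro hj
    have hjL : j < n.toNat := by omega
    have hn : (n.toNat : Int) = n := by omega
    have hstep : altF cap deliveries pickups n (j + 1)
        = altStep cap deliveries pickups (altF cap deliveries pickups n j) (n - 1 - (j : Int)) := by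
      unfold altF
      rw [List.range_succ, List.map_append, List.foldl_append]
      rfl
    rw [hstep, ih (by omega)]
    have hidx : n - 1 - (j : Int) = ((n.toNat - 1 - j : Nat) : Int) := by omega
    have hdget : PySem.List.pyGetD deliveries (n - 1 - (j : Int)) 0
        = deliveries.getD (n.toNat - 1 - j) 0 := by
      rw [hidx, PySem.List.pyGetD_natCast]
    have hpget : PySem.List.pyGetD pickups (n - 1 - (j : Int)) 0
        = pickups.getD (n.toNat - 1 - j) 0 := by
      rw [hidx, PySem.List.pyGetD_natCast]
    have hsfxstep : ∀ xs : List Int, sfx xs n.toNat (n.toNat - j) + max (xs.getD (n.toNat - 1 - j) 0) 0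
        = sfx xs n.toNat (n.toNat - (j + 1)) := by
      intro xs
      unfold sfx
      have h1 : n.toNat - (j + 1) = n.toNat - 1 - j := by omega
      rw [h1, Finset.sum_eq_sum_Ico_succ_bot (by omega : n.toNat - 1 - j < n.toNat)]
      have h2 : n.toNat - 1 - j + 1 = n.toNat - j := by omega
      rw [h2]
      unfold dF
      ring
    unfold altStep
    simp only [hdget, hpget]
    have hds := hsfxstep deliveries
    have hps := hsfxstep pickups
    have hk1 : n.toNat - (j + 1) = n.toNat - 1 - j := by omega
    refine Prod.ext ?_ (Prod.ext ?_ ?_)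
    · -- first component
      simp only [hds, hps]
      rw [Finset.sum_range_succ, hk1]
      have hmax : (if sfx pickups n.toNat (n.toNat - 1 - j) < sfx deliveries n.toNat (n.toNat - 1 - j)
            then sfx deliveries n.toNat (n.toNat - 1 - j) else sfx pickups n.toNat (n.toNat - 1 - j))
          = max (sfx deliveries n.toNat (n.toNat - 1 - j)) (sfx pickups n.toNat (n.toNat - 1 - j)) := by
        rcases max_cases (sfx deliveries n.toNat (n.toNat - 1 - j))
            (sfx pickups n.toNat (n.toNat - 1 - j)) with ⟨h1, h2⟩ | ⟨h1, h2⟩ <;>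
          rw [h1] <;> split <;> omega
      rw [hmax]
      unfold cdiv
      by_cases h0 : 0 < max (sfx deliveries n.toNat (n.toNat - 1 - j)) (sfx pickups n.toNat (n.toNat - 1 - j))
      · rw [if_pos h0, if_pos h0]; ring
      · rw [if_neg h0, if_neg h0]; ring
    · exact hds
    · exact hps

-- Source B's value in closed form
theorem alt_eq (cap : Int) (n : Int) (deliveries pickups : List Int) :
    solution_alt cap n deliveries pickups
      = 2 * ∑ k ∈ Finset.range n.toNat,
          cdiv cap (max (sfx deliveries n.toNat k) (sfx pickups n.toNat k)) := by
  rw [solution_alt_eq_altF, altF_invariant cap deliveries pickups n n.toNat le_rfl]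
  simp only
  rw [Finset.sum_range_reflect
    (fun k => cdiv cap (max (sfx deliveries n.toNat k) (sfx pickups n.toNat k))) n.toNat]

theorem solution_unfold (cap n : Int) (deliveries pickups : List Int) :
    solution cap n deliveries pickups =
      solnOuter cap
        ((((solnBuild deliveries pickups n).1.map Prod.snd).sum
          + ((solnBuild deliveries pickups n).2.map Prod.snd).sum).toNat + 1)
        (solnBuild deliveries pickups n).1 (solnBuild deliveries pickups n).2 0 := rfl

-- ===== VERDICT (by name: the statement is the Claim_ definition above) =====
theorem solution_spec : Claim_equal_solution := by
  intro cap n deliveries pickups _ hpre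
  obtain ⟨hdl, hpl, hcap⟩ := hpre
  unfold Spec_solution
  have hB := alt_eq cap n deliveries pickups
  have hbuild := buildF_invariant deliveries pickups n.toNat
  rw [← solnBuild_eq_buildF] at hbuild
  obtain ⟨hgd, hgp, hSd, hSp⟩ := hbuild
  rw [hB, solution_unfold]
  rcases hcap with hc | ⟨hdneg, hpneg⟩
  · rw [total_eq_S_zero _ _ hgd, total_eq_S_zero _ _ hgp,
      outer_eq cap hc n.toNat _ _ _ _ hgd hgp (by omega)]
    simp only [hSd, hSp, sfx]
    omega
  · -- cap ≤ 0 but no positive load among the first n stations: both sides are 0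
    have hdF0 : ∀ xs : List Int, (∀ x ∈ xs.take n.toNat, x ≤ 0) → ∀ i, i < n.toNat → dF xs i = 0 := by
      intro xs hx i hi
      unfold dF
      by_cases hlen : i < xs.length
      · have hlt : i < (xs.take n.toNat).length := by
          rw [List.length_take]; omega
        have hmem : xs[i] ∈ xs.take n.toNat := by
          have h1 := List.getElem_mem hlt
          rwa [List.getElem_take] at h1
        have hle := hx _ hmem
        rw [List.getD_eq_getElem xs 0 hlen]
        omega
      · rw [List.getD_eq_default xs 0 (by omega)]
        omega
    have hsfx0 : ∀ xs : List Int, (∀ x ∈ xs.take n.toNat, x ≤ 0) → ∀ k, sfx xs n.toNat k = 0 := by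
      intro xs hx k
      unfold sfx
      exact Finset.sum_eq_zero (fun i hi => hdF0 xs hx i (Finset.mem_Ico.1 hi).2)
    have hd0 : S (solnBuild deliveries pickups n).1 0 = 0 := by
      rw [hSd 0]
      exact Finset.sum_eq_zero (fun i hi => hdF0 deliveries hdneg i (Finset.mem_Ico.1 hi).2)
    have hp0 : S (solnBuild deliveries pickups n).2 0 = 0 := by
      rw [hSp 0]
      exact Finset.sum_eq_zero (fun i hi => hdF0 pickups hpneg i (Finset.mem_Ico.1 hi).2)
    have hdnil := stack_nil_of_S_zero _ _ hgd hd0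
    have hpnil := stack_nil_of_S_zero _ _ hgp hp0
    have hR : ∑ k ∈ Finset.range n.toNat,
        cdiv cap (max (sfx deliveries n.toNat k) (sfx pickups n.toNat k)) = 0 :=
      Finset.sum_eq_zero (fun k _ => by
        rw [hsfx0 deliveries hdneg k, hsfx0 pickups hpneg k]
        simp [cdiv])
    rw [hR, hdnil, hpnil, solnOuter_succ]
    simp
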